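-- pv_equiv track=rewrite | github.com/dmnjcu/cp1404practicals | prac_09/cleanup_files.py | get_fixed_filename
-- ===== SOURCE A (Python) =====
-- def get_fixed_filename(filename):
--     """Return a 'fixed' version of filename."""
--     len_filename = len(filename)
--     count = 0
--     filename = filename.replace(" ", "_").replace(".TXT", ".txt")
--     new_name = filename
--     for index, value in enumerate(filename):
--         if index <= len_filename - 2:
--             if value == '_':
--                 new_name = new_name[:index + count + 1] + new_name[1 + count + index:].capitalize()
--             elif value.islower() and filename[index + 1].isupper():
--                 new_name = new_name[:index + count + 1] + "_" + new_name[1 + count + index:].capitalize()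
--                 count += 1
--     return new_name
-- ===== SOURCE B (Python) =====
-- def get_fixed_filename(filename):
--     """Return a 'fixed' version of filename."""
--     s = filename.replace(" ", "_").replace(".TXT", ".txt")
--     marked = []
--     for i, c in enumerate(s):
--         marked.append(c)
--         if c.islower() and i + 1 < len(s) and s[i + 1].isupper():
--             marked.append("_")
--     words = "".join(marked).split("_")
--     return "_".join(words[:1] + [w.capitalize() for w in words[1:]])
-- ===== Notes on version B (the rewrite author's own statement) =====
-- stated objective: simpler
-- what changed: A rebuilds the name in place with repeated slicing, an insertion-offset counter and re-capitalization of the whole remaining tail at every boundary; B does one marking scan that inserts an underscore at each lower-to-upper boundary, then splits on underscores, capitalizes every word after the first, and joins.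
import Mathlib
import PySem

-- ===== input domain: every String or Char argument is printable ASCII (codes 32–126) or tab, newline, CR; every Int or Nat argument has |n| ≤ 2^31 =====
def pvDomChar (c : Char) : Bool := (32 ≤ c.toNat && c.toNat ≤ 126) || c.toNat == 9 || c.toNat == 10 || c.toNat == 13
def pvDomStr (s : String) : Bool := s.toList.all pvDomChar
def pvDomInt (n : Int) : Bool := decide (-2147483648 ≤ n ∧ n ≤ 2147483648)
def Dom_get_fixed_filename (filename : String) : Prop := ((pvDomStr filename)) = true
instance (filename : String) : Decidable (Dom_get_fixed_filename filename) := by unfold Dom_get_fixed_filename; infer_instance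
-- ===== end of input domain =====

-- B replaces A's index loop (which repeatedly re-slices and re-capitalizes the whole tail) by a
-- single marking scan + split on '_' + capitalize each later word + join; objective: simpler.

-- ===== PORT A =====
-- str.capitalize is not in PySem: hand-ported; exact on ASCII (titlecase = uppercase there)
def pyCapitalize (cs : List Char) : List Char :=
  match cs with
  | [] => []
  | c :: rest => PySem.Chars.upperChar c :: PySem.Chars.lower rest

-- body of A's for-loop; state = (count, new_name), item = (value, index) from enumerate
def aStep (len_filename : Int) (fixed : List Char) (st : Int × List Char) (vi : Char × Nat) : Int × List Char :=
  let value := vi.1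
  let index : Int := (vi.2 : Int)
  let count := st.1
  let new_name := st.2
  if index ≤ len_filename - 2 then
    if value = '_' then
      (count, PySem.List.slice new_name none (some (index + count + 1)) ++
              pyCapitalize (PySem.List.slice new_name (some (1 + count + index)) none))
    -- fixed[index+1]: always in range when the guard holds (both str.replace calls preserve the
    -- length), so the pyGetD default is never used
    else if PySem.Chars.islower value && PySem.Chars.isupper (PySem.List.pyGetD fixed (index + 1) ' ') then
      (count + 1, PySem.List.slice new_name none (some (index + count + 1)) ++ ['_'] ++
                  pyCapitalize (PySem.List.slice new_name (some (1 + count + index)) none))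
    else (count, new_name)
  else (count, new_name)

def get_fixed_filename (filename : String) : String :=
  let len_filename : Int := PySem.Str.len filename
  let fixed : List Char := PySem.Chars.replace
      (PySem.Chars.replace filename.toList [' '] ['_']) ".TXT".toList ".txt".toList
  let final := (fixed.zipIdx).foldl (aStep len_filename fixed) ((0 : Int), fixed)
  String.ofList final.2

-- ===== PORT B =====
-- body of B's marking scan: emit the char, plus '_' at a lower→upper boundary
def bStep (s : List Char) (acc : List Char) (ci : Char × Nat) : List Char :=
  acc ++ [ci.1] ++
    (if PySem.Chars.islower ci.1 && decide (((ci.2 : Int)) + 1 < PySem.Chars.len s) &&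
        PySem.Chars.isupper (PySem.List.pyGetD s ((ci.2 : Int) + 1) ' ') then ['_'] else [])

def get_fixed_filename_alt (filename : String) : String :=
  let s : List Char := PySem.Chars.replace
      (PySem.Chars.replace filename.toList [' '] ['_']) ".TXT".toList ".txt".toList
  let marked := (s.zipIdx).foldl (bStep s) []
  let words := PySem.Chars.splitOn marked ['_']
  String.ofList (PySem.Chars.join ['_'] (words.take 1 ++ (words.drop 1).map pyCapitalize))

-- ===== PRECONDITION & SPEC =====
def Spec_get_fixed_filename (filename : String) (out : String) : Prop := out = get_fixed_filename_alt filename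
instance (filename : String) (out : String) : Decidable (Spec_get_fixed_filename filename out) := by unfold Spec_get_fixed_filename; infer_instance

-- ===== CLAIM (what is proved, stated in full; the proofs are below) =====
def Claim_equal_get_fixed_filename : Prop := ∀ (filename : String), Dom_get_fixed_filename filename → Spec_get_fixed_filename filename (get_fixed_filename filename)

-- ===== LEMMAS AND PROOFS =====

-- ---- character facts ----
theorem char_le_iff (a b : Char) : a ≤ b ↔ a.toNat ≤ b.toNat := ⟨Fin.mk_le_mk.mp, Fin.mk_le_mk.mpr⟩

theorem char_eq_of_toNat_eq (a b : Char) (h : a.toNat = b.toNat) : a = b := by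
  apply Char.ext; apply UInt32.toNat_inj.mp; exact h

theorem toNat_ofNat' (n : Nat) (h : n < 55296) : (Char.ofNat n).toNat = n := by
  rw [Char.toNat_ofNat]; simp [Nat.isValidChar]; omega

theorem islower_iff (c : Char) : PySem.Chars.islower c = true ↔ 97 ≤ c.toNat ∧ c.toNat ≤ 122 := by
  simp [PySem.Chars.islower, char_le_iff]

theorem isupper_iff (c : Char) : PySem.Chars.isupper c = true ↔ 65 ≤ c.toNat ∧ c.toNat ≤ 90 := by
  simp [PySem.Chars.isupper, char_le_iff]

theorem upperChar_lowerChar (c : Char) : PySem.Chars.upperChar (PySem.Chars.lowerChar c) = PySem.Chars.upperChar c := by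
  unfold PySem.Chars.lowerChar PySem.Chars.upperChar
  by_cases h : PySem.Chars.isupper c = true
  · rw [if_pos h]
    rw [isupper_iff] at h
    have ht : (Char.ofNat (c.toNat + 32)).toNat = c.toNat + 32 := toNat_ofNat' _ (by omega)
    rw [if_pos (by rw [islower_iff, ht]; omega)]
    rw [if_neg (by rw [islower_iff]; omega)]
    apply char_eq_of_toNat_eq
    rw [ht, Nat.add_sub_cancel, toNat_ofNat' _ (by omega)]
  · rw [if_neg h]

theorem lowerChar_lowerChar (c : Char) : PySem.Chars.lowerChar (PySem.Chars.lowerChar c) = PySem.Chars.lowerChar c := by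
  unfold PySem.Chars.lowerChar
  by_cases h : PySem.Chars.isupper c = true
  · rw [if_pos h]
    rw [isupper_iff] at h
    have ht : (Char.ofNat (c.toNat + 32)).toNat = c.toNat + 32 := toNat_ofNat' _ (by omega)
    rw [if_neg (by rw [isupper_iff, ht]; omega)]
  · rw [if_neg h, if_neg h]

theorem pyCapitalize_lower (xs : List Char) : pyCapitalize (PySem.Chars.lower xs) = pyCapitalize xs := by
  cases xs with
  | nil => rfl
  | cons c rest => simp [pyCapitalize, PySem.Chars.lower, List.map_map, Function.comp_def,
      upperChar_lowerChar, lowerChar_lowerChar]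

-- ---- the common middle form: one scan with a (seen a word break, capitalize next) state ----
def boundaryB (c : Char) (rest : List Char) : Bool :=
  PySem.Chars.islower c && (match rest with | [] => false | d :: _ => PySem.Chars.isupper d)

def goSt : List Char → Bool → Bool → List Char
  | [], _, _ => []
  | c :: rest, seen, capNext =>
    let c' := if seen then (if capNext then PySem.Chars.upperChar c else PySem.Chars.lowerChar c) else c
    if c = '_' then c' :: goSt rest true true
    else if boundaryB c rest then c' :: '_' :: goSt rest true true
    else c' :: goSt rest seen false

-- how A's pending capitalize/lowercase acts on the not-yet-processed tail
def tr (seen capNext : Bool) (xs : List Char) : List Char :=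
  if seen then (if capNext then pyCapitalize xs else PySem.Chars.lower xs) else xs

theorem tr_nil (seen capNext : Bool) : tr seen capNext [] = [] := by
  cases seen <;> cases capNext <;> simp [tr, pyCapitalize, PySem.Chars.lower]

theorem tr_cons (seen capNext : Bool) (c : Char) (rest : List Char) :
    tr seen capNext (c :: rest) =
      (if seen then (if capNext then PySem.Chars.upperChar c else PySem.Chars.lowerChar c) else c)
        :: tr seen false rest := by
  cases seen <;> cases capNext <;> simp [tr, pyCapitalize, PySem.Chars.lower]

theorem transform_underscore (seen capNext : Bool) :
    (if seen then (if capNext then PySem.Chars.upperChar '_' else PySem.Chars.lowerChar '_') else '_') = '_' := by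
  cases seen <;> cases capNext <;> decide

theorem pyCapitalize_tr_false (seen : Bool) (xs : List Char) :
    pyCapitalize (tr seen false xs) = pyCapitalize xs := by
  cases seen <;> simp [tr, pyCapitalize_lower]

-- ---- str.replace preserves the length for equal-length patterns ----
theorem replace_go_length (old new : List Char) (_hne : old ≠ []) (hlen : old.length = new.length) :
    ∀ (fuel : Nat) (l acc : List Char),
      (PySem.Chars.replace.go old new fuel l acc).length = acc.length + l.length := by
  intro fuel
  induction fuel with
  | zero => intro l acc; simp [PySem.Chars.replace.go]
  | succ n ih =>
    intro l acc
    cases l with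
    | nil => simp [PySem.Chars.replace.go]
    | cons c t =>
      rw [PySem.Chars.replace.go]
      by_cases hp : old.isPrefixOf (c :: t) = true
      · rw [if_pos hp, ih]
        have hle : old.length ≤ (c :: t).length := (List.isPrefixOf_iff_prefix.mp hp).length_le
        simp at hle ⊢
        omega
      · rw [if_neg hp, ih]; simp; omega

theorem replace_length (x old new : List Char) (hne : old ≠ []) (hlen : old.length = new.length) :
    (PySem.Chars.replace x old new).length = x.length := by
  unfold PySem.Chars.replace
  rw [if_neg (by simpa [List.isEmpty_iff] using hne)]
  simpa using replace_go_length old new hne hlen x.length x []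

-- ---- little drop/index facts ----
theorem len_from_drop {s : List Char} {k : Nat} {c : Char} {rest : List Char}
    (h : s.drop k = c :: rest) : s.length = k + 1 + rest.length ∧ k < s.length := by
  have hk : k < s.length := by
    by_contra hk
    rw [List.drop_eq_nil_of_le (by omega)] at h
    exact absurd h (by simp)
  have := congrArg List.length h
  rw [List.length_drop] at this
  simp at this
  omega

theorem drop_succ_of_drop {s : List Char} {k : Nat} {c : Char} {rest : List Char}
    (h : s.drop k = c :: rest) : s.drop (k + 1) = rest := by
  have := congrArg List.tail h
  simpa [List.tail_drop] using this

theorem getD_next {s : List Char} {k : Nat} {c : Char} {rest : List Char}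
    (h : s.drop k = c :: rest) (d : Char) :
    PySem.List.pyGetD s ((k : Int) + 1) d = rest.getD 0 d := by
  have h1 : s.drop (k + 1) = rest := drop_succ_of_drop h
  have h2 : ((k : Int) + 1) = ((k + 1 : Nat) : Int) := by push_cast; ring
  rw [h2, PySem.List.pyGetD_natCast]
  rcases rest with _ | ⟨r, rs⟩
  · have hlen := (len_from_drop h).1
    simp only [List.length_nil] at hlen
    have hnone : s[k + 1]? = none := List.getElem?_eq_none (by omega)
    simp [List.getD, hnone]
  · have hget : s[k + 1]? = some r := by
      have : (s.drop (k + 1))[0]? = some r := by rw [h1]; rfl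
      rwa [List.getElem?_drop, Nat.add_zero] at this
    simp [List.getD, hget]

-- ---- A's loop computes goSt ----
theorem loopA (lenf : Int) (s : List Char) (hlen : lenf = (s.length : Int)) :
    ∀ (tail : List Char) (k : Nat) (seen capNext : Bool) (out : List Char) (count : Int),
      s.drop k = tail →
      count = (out.length : Int) - (k : Int) →
      ((tail.zipIdx k).foldl (aStep lenf s) (count, out ++ tr seen capNext tail)).2
        = out ++ goSt tail seen capNext := by
  intro tail
  induction tail with
  | nil => intro k seen capNext out count h hc; simp [tr_nil, goSt]
  | cons c rest ih =>
    intro k seen capNext out count h hcount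
    obtain ⟨hlen2, hk⟩ := len_from_drop h
    have hdrop' := drop_succ_of_drop h
    rw [List.zipIdx_cons, List.foldl_cons, tr_cons]
    set c' := (if seen then (if capNext then PySem.Chars.upperChar c else PySem.Chars.lowerChar c) else c) with hc'
    cases rest with
    | nil =>
      -- last character: the guard index ≤ len-2 is false, the state is unchanged
      have hguard : ¬ ((k : Int) ≤ lenf - 2) := by
        rw [hlen]; simp only [List.length_nil] at hlen2; omega
      have hstep : aStep lenf s (count, out ++ c' :: tr seen false []) (c, k)
          = (count, out ++ c' :: tr seen false []) := by
        unfold aStep; rw [if_neg hguard]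
      rw [hstep]
      simp only [List.zipIdx_nil, List.foldl_nil, tr_nil]
      by_cases hc : c = '_'
      · subst hc; simp [goSt, ← hc']
      · simp [goSt, boundaryB, hc, ← hc']
    | cons d rs =>
      have hguard : (k : Int) ≤ lenf - 2 := by
        rw [hlen]; simp only [List.length_cons] at hlen2; omega
      have hidx1 : (k : Int) + count + 1 = ((out.length + 1 : Nat) : Int) := by push_cast; omega
      have hidx2 : (1 : Int) + count + (k : Int) = ((out.length + 1 : Nat) : Int) := by push_cast; omega
      have htake : PySem.List.slice (out ++ c' :: tr seen false (d :: rs)) none (some ((k : Int) + count + 1))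
          = out ++ [c'] := by
        rw [hidx1, PySem.List.slice_to_natCast]
        rw [show out ++ c' :: tr seen false (d :: rs) = (out ++ [c']) ++ tr seen false (d :: rs) by simp]
        rw [show out.length + 1 = (out ++ [c']).length + 0 by simp]
        rw [List.take_length_add_append]
        simp
      have hdrop : PySem.List.slice (out ++ c' :: tr seen false (d :: rs)) (some ((1 : Int) + count + (k : Int))) none
          = tr seen false (d :: rs) := by
        rw [hidx2, PySem.List.slice_from_natCast]
        rw [show out ++ c' :: tr seen false (d :: rs) = (out ++ [c']) ++ tr seen false (d :: rs) by simp]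
        rw [show out.length + 1 = (out ++ [c']).length + 0 by simp]
        rw [List.drop_length_add_append]
        simp
      have hnext : PySem.List.pyGetD s ((k : Int) + 1) ' ' = d := by rw [getD_next h]; rfl
      by_cases hc : c = '_'
      · -- underscore branch
        have hstep : aStep lenf s (count, out ++ c' :: tr seen false (d :: rs)) (c, k)
            = (count, (out ++ [c']) ++ pyCapitalize (d :: rs)) := by
          unfold aStep
          rw [if_pos hguard, if_pos hc, htake, hdrop, pyCapitalize_tr_false]
        rw [hstep]
        have : pyCapitalize (d :: rs) = tr true true (d :: rs) := by simp [tr]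
        rw [this]
        rw [ih (k + 1) true true (out ++ [c']) count hdrop' (by simp; omega)]
        subst hc
        simp [goSt, ← hc']
      · by_cases hb : boundaryB c (d :: rs) = true
        · -- camelCase boundary branch
          have hcond : (PySem.Chars.islower c && PySem.Chars.isupper (PySem.List.pyGetD s ((k : Int) + 1) ' ')) = true := by
            rw [hnext]; simpa [boundaryB] using hb
          have hstep : aStep lenf s (count, out ++ c' :: tr seen false (d :: rs)) (c, k)
              = (count + 1, (out ++ [c', '_']) ++ pyCapitalize (d :: rs)) := by
            unfold aStep
            rw [if_pos hguard, if_neg hc, if_pos hcond, htake, hdrop, pyCapitalize_tr_false]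
            simp
          rw [hstep]
          have : pyCapitalize (d :: rs) = tr true true (d :: rs) := by simp [tr]
          rw [this]
          rw [ih (k + 1) true true (out ++ [c', '_']) (count + 1) hdrop' (by simp; omega)]
          simp [goSt, hb, hc, ← hc']
        · -- no boundary
          have hcond : (PySem.Chars.islower c && PySem.Chars.isupper (PySem.List.pyGetD s ((k : Int) + 1) ' ')) = false := by
            rw [hnext]; simpa [boundaryB] using hb
          have hstep : aStep lenf s (count, out ++ c' :: tr seen false (d :: rs)) (c, k)
              = (count, (out ++ [c']) ++ tr seen false (d :: rs)) := by
            unfold aStep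
            rw [if_pos hguard, if_neg hc, hcond]
            simp
          rw [hstep]
          rw [ih (k + 1) seen false (out ++ [c']) count hdrop' (by simp; omega)]
          simp [goSt, hb, hc, ← hc']

-- ---- B's marking loop computes markRec ----
def markRec : List Char → List Char
  | [] => []
  | c :: rest => c :: (if boundaryB c rest then '_' :: markRec rest else markRec rest)

theorem loopB (s : List Char) :
    ∀ (tail : List Char) (k : Nat) (acc : List Char),
      s.drop k = tail →
      (tail.zipIdx k).foldl (bStep s) acc = acc ++ markRec tail := by
  intro tail
  induction tail with
  | nil => intro k acc h; simp [markRec]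
  | cons c rest ih =>
    intro k acc h
    obtain ⟨hlen, hk⟩ := len_from_drop h
    have hlenInt : PySem.Chars.len s = (s.length : Int) := by simp [PySem.Chars.len_eq]
    have hnext : PySem.List.pyGetD s ((k : Int) + 1) ' ' = rest.getD 0 ' ' := getD_next h ' '
    rw [List.zipIdx_cons, List.foldl_cons]
    have hstep : bStep s acc (c, k) = acc ++ [c] ++ (if boundaryB c rest then ['_'] else []) := by
      unfold bStep
      congr 1
      have hcond : (PySem.Chars.islower c && decide (((k : Nat) : Int) + 1 < PySem.Chars.len s) &&
          PySem.Chars.isupper (PySem.List.pyGetD s (((k : Nat) : Int) + 1) ' ')) = boundaryB c rest := by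
        rw [hnext, hlenInt]
        cases rest with
        | nil =>
          have hfalse : ¬ (((k : Nat) : Int) + 1 < (s.length : Int)) := by
            simp only [List.length_nil] at hlen; omega
          simp [hfalse, boundaryB]
        | cons d rest' =>
          have htrue : (((k : Nat) : Int) + 1 < (s.length : Int)) := by
            simp only [List.length_cons] at hlen; omega
          simp [htrue, boundaryB]
      rw [hcond]
    rw [hstep]
    rw [ih (k + 1) _ (drop_succ_of_drop h)]
    rw [markRec]
    split <;> simp

-- ---- split on '_' as a structural recursion ----
def splitU : List Char → List (List Char)
  | [] => [[]]
  | c :: rest =>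
    if c = '_' then [] :: splitU rest
    else match splitU rest with
         | [] => [[c]]
         | w :: ws => (c :: w) :: ws

theorem splitU_ne_nil (m : List Char) : splitU m ≠ [] := by
  cases m with
  | nil => simp [splitU]
  | cons c rest =>
    simp only [splitU]
    split
    · simp
    · split <;> simp_all

theorem splitOn_go_eq (fuel : Nat) :
    ∀ (l cur : List Char) (acc : List (List Char)), l.length < fuel →
      PySem.Chars.splitOn.go ['_'] fuel l cur acc =
        acc.reverse ++ (match splitU l with
                        | [] => []
                        | w :: ws => (cur.reverse ++ w) :: ws) := by
  induction fuel with
  | zero => intro l cur acc h; omega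
  | succ n ih =>
    intro l cur acc h
    cases l with
    | nil => simp [PySem.Chars.splitOn.go, splitU]
    | cons c rest =>
      rw [PySem.Chars.splitOn.go]
      by_cases hc : c = '_'
      · subst hc
        rw [if_pos (by simp [List.isPrefixOf])]
        simp only [List.length_cons, List.drop_succ_cons, List.length_nil, List.drop_zero]
        rw [ih rest [] (List.reverse cur :: acc) (by simp at h ⊢; omega)]
        cases hsp : splitU rest with
        | nil => exact absurd hsp (splitU_ne_nil rest)
        | cons w ws => simp [splitU, hsp]
      · rw [if_neg (by simp [List.isPrefixOf]; intro h'; exact hc h'.symm)]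
        rw [ih rest (c :: cur) acc (by simp at h ⊢; omega)]
        cases hsp : splitU rest with
        | nil => exact absurd hsp (splitU_ne_nil rest)
        | cons w ws => simp [splitU, hsp, hc]

theorem splitOn_eq_splitU (m : List Char) : PySem.Chars.splitOn m ['_'] = splitU m := by
  unfold PySem.Chars.splitOn
  rw [splitOn_go_eq (m.length + 1) m [] [] (by omega)]
  cases hsp : splitU m with
  | nil => exact absurd hsp (splitU_ne_nil m)
  | cons w ws => simp

-- ---- processing the marked string ----
def goM : List Char → Bool → Bool → List Char
  | [], _, _ => []
  | c :: rest, seen, capNext =>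
    if c = '_' then '_' :: goM rest true true
    else (if seen then (if capNext then PySem.Chars.upperChar c else PySem.Chars.lowerChar c) else c)
           :: goM rest seen false

theorem goSt_eq_goM : ∀ (xs : List Char) (seen capNext : Bool),
    goSt xs seen capNext = goM (markRec xs) seen capNext := by
  intro xs
  induction xs with
  | nil => intro seen capNext; rfl
  | cons c rest ih =>
    intro seen capNext
    by_cases hc : c = '_'
    · subst hc
      have hb : boundaryB '_' rest = false := by
        simp [boundaryB, PySem.Chars.islower]
      simp [goSt, goM, markRec, hb, transform_underscore, ih]
    · by_cases hb : boundaryB c rest = true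
      · simp [goSt, goM, markRec, hb, hc, ih]
      · simp [goSt, goM, markRec, hb, hc, ih]

theorem lower_cons (c : Char) (w : List Char) :
    PySem.Chars.lower (c :: w) = PySem.Chars.lowerChar c :: PySem.Chars.lower w := by
  simp [PySem.Chars.lower]

-- first word transformed by f, every later word capitalized
def applyAll (b : Bool) : List (List Char) → List (List Char)
  | [] => []
  | w :: ws => (if b then pyCapitalize w else PySem.Chars.lower w) :: ws.map pyCapitalize

theorem join_cons_head (c : Char) (w : List Char) (ws : List (List Char)) :
    PySem.Chars.join ['_'] ((c :: w) :: ws) = c :: PySem.Chars.join ['_'] (w :: ws) := by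
  cases ws with
  | nil => simp [PySem.Chars.join_singleton]
  | cons q rest => rw [PySem.Chars.join_cons_cons, PySem.Chars.join_cons_cons]; simp

theorem join_applyAll : ∀ (m : List Char) (b : Bool),
    PySem.Chars.join ['_'] (applyAll b (splitU m)) = goM m true b := by
  intro m
  induction m with
  | nil => intro b; cases b <;> simp [splitU, applyAll, pyCapitalize, PySem.Chars.lower, PySem.Chars.join_singleton, goM]
  | cons c rest ih =>
    intro b
    by_cases hc : c = '_'
    · subst hc
      cases hsp : splitU rest with
      | nil => exact absurd hsp (splitU_ne_nil rest)
      | cons w ws =>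
        have e1 : splitU ('_' :: rest) = [] :: w :: ws := by simp [splitU, hsp]
        rw [e1]
        have e2 : applyAll b ([] :: w :: ws) = [] :: applyAll true (w :: ws) := by
          cases b <;> simp [applyAll, pyCapitalize, PySem.Chars.lower]
        have e4 : applyAll true (w :: ws) = pyCapitalize w :: ws.map pyCapitalize := by simp [applyAll]
        rw [e2, e4, PySem.Chars.join_cons_cons]
        have e3 : goM ('_' :: rest) true b = '_' :: goM rest true true := by simp [goM]
        rw [e3, ← ih true, hsp]
        simp [applyAll]
    · cases hsp : splitU rest with
      | nil => exact absurd hsp (splitU_ne_nil rest)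
      | cons w ws =>
        have e1 : splitU (c :: rest) = (c :: w) :: ws := by simp [splitU, hsp, hc]
        rw [e1]
        have e2 : applyAll b ((c :: w) :: ws) =
            ((if b then PySem.Chars.upperChar c else PySem.Chars.lowerChar c) :: PySem.Chars.lower w)
              :: ws.map pyCapitalize := by
          cases b <;> simp [applyAll, pyCapitalize, lower_cons]
        rw [e2, join_cons_head]
        have e3 : goM (c :: rest) true b =
            (if b then PySem.Chars.upperChar c else PySem.Chars.lowerChar c) :: goM rest true false := by
          cases b <;> simp [goM, hc]
        rw [e3, ← ih false, hsp]
        simp [applyAll]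

theorem join_words : ∀ (m : List Char),
    PySem.Chars.join ['_'] ((splitU m).take 1 ++ ((splitU m).drop 1).map pyCapitalize)
      = goM m false false := by
  intro m
  induction m with
  | nil => simp [splitU, PySem.Chars.join_singleton, goM]
  | cons c rest ih =>
    by_cases hc : c = '_'
    · subst hc
      cases hsp : splitU rest with
      | nil => exact absurd hsp (splitU_ne_nil rest)
      | cons w ws =>
        have e1 : splitU ('_' :: rest) = [] :: w :: ws := by simp [splitU, hsp]
        rw [e1]
        have e2 : ([] :: w :: ws).take 1 ++ (([] :: w :: ws).drop 1).map pyCapitalize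
            = [] :: applyAll true (w :: ws) := by simp [applyAll]
        have e4 : applyAll true (w :: ws) = pyCapitalize w :: ws.map pyCapitalize := by simp [applyAll]
        rw [e2, e4, PySem.Chars.join_cons_cons]
        have e3 : goM ('_' :: rest) false false = '_' :: goM rest true true := by simp [goM]
        rw [e3, ← join_applyAll rest true, hsp]
        simp [applyAll]
    · cases hsp : splitU rest with
      | nil => exact absurd hsp (splitU_ne_nil rest)
      | cons w ws =>
        have e1 : splitU (c :: rest) = (c :: w) :: ws := by simp [splitU, hsp, hc]
        rw [e1]
        have e2 : ((c :: w) :: ws).take 1 ++ (((c :: w) :: ws).drop 1).map pyCapitalize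
            = (c :: w) :: ws.map pyCapitalize := by simp
        rw [e2, join_cons_head]
        have e3 : goM (c :: rest) false false = c :: goM rest false false := by simp [goM, hc]
        rw [e3, ← ih, hsp]
        simp

-- ===== VERDICT (by name: the statement is the Claim_ definition above) =====
theorem get_fixed_filename_spec : Claim_equal_get_fixed_filename := by
  unfold Claim_equal_get_fixed_filename
  intro filename _
  unfold Spec_get_fixed_filename get_fixed_filename get_fixed_filename_alt
  set s : List Char := PySem.Chars.replace
      (PySem.Chars.replace filename.toList [' '] ['_']) ".TXT".toList ".txt".toList with hs
  have hlen : PySem.Str.len filename = (s.length : Int) := by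
    rw [hs, replace_length _ _ _ (by decide) (by decide), replace_length _ _ _ (by decide) (by decide)]
    simp [PySem.Str.len_eq]
  have hA : ((s.zipIdx).foldl (aStep (PySem.Str.len filename) s) ((0 : Int), s)).2
      = goSt s false false := by
    have := loopA (PySem.Str.len filename) s hlen s 0 false false [] 0 (by simp) (by simp)
    simpa [tr] using this
  have hB : (s.zipIdx).foldl (bStep s) [] = markRec s := by
    simpa using loopB s s 0 [] (by simp)
  simp only [hA, hB, splitOn_eq_splitU, join_words, goSt_eq_goM]
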